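-- pv_equiv track=rewrite | github.com/hunter-classes/fall-2022-127-work-ThomasH242 | mode/modes.py | mode
-- ===== SOURCE A (Python) =====
-- def freq(l,v):
--     c = 0
--     for i in l:
--         if i == v:
--             c+=1
--     return c
--
-- def mode(l):
--     msf = l[0]
--     freqsf = freq(l,msf)
--     for i in l:
--         if freq(l,i) > freqsf:
--             msf = i
--             freqsf = freq(l,i)
--     return msf
-- ===== SOURCE B (Python) =====
-- def mode(l):
--     counts = {}
--     for x in l:
--         counts[x] = counts.get(x, 0) + 1
--     best, bestc = l[0], 0
--     for k, c in counts.items():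
--         if c > bestc:
--             best, bestc = k, c
--     return best
-- ===== Notes on version B (the rewrite author's own statement) =====
-- stated objective: faster
-- what changed: B builds a frequency dictionary in one pass and scans its insertion-ordered items once, instead of A's rescanning the whole list to recount every element's frequency.
import Mathlib
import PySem

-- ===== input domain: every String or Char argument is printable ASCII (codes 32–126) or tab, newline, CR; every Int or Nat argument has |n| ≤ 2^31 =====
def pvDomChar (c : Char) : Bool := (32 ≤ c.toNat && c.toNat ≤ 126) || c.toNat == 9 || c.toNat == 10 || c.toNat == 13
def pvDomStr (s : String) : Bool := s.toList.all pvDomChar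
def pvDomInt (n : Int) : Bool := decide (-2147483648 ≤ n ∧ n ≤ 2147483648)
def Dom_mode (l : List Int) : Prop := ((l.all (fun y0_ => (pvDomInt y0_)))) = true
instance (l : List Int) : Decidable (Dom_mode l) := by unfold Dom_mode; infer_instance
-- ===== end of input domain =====

-- B replaces A's quadratic recount-per-element scan with one counting pass over a dict
-- plus one scan of its insertion-ordered items (return value only; neither version mutates l).

-- ===== PORT A =====
def freq (l : List Int) (v : Int) : Int :=
  l.foldl (fun c i => if i == v then c + 1 else c) 0

def mode (l : List Int) : Int :=
  match PySem.List.pyGet? l 0 with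
  | none => 0  -- unreachable under Pre_mode: l[0] raises IndexError on []
  | some msf0 =>
    (l.foldl (fun s i => if freq l i > s.2 then (i, freq l i) else s) (msf0, freq l msf0)).1

-- ===== PORT B =====
def mode_alt (l : List Int) : Int :=
  let counts := l.foldl (fun d x => d.insert x (d.getD x 0 + 1)) (PySem.Dict.empty)
  match PySem.List.pyGet? l 0 with
  | none => 0  -- unreachable under Pre_mode: l[0] raises IndexError on []
  | some b0 =>
    (counts.items.foldl (fun (s : Int × Int) kc => if kc.2 > s.2 then kc else s) (b0, 0)).1

-- ===== PRECONDITION & SPEC =====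
-- Pre_mode excludes only the empty list, where A's l[0] raises IndexError (B's does too).
def Pre_mode (l : List Int) : Prop := l ≠ []
instance (l : List Int) : Decidable (Pre_mode l) := by unfold Pre_mode; infer_instance

def pvWitness_mode : List Int := [3, 1, 3, 1, 2]

def Spec_mode (l : List Int) (out : Int) : Prop := out = mode_alt l
instance (l : List Int) (out : Int) : Decidable (Spec_mode l out) := by unfold Spec_mode; infer_instance

-- ===== CLAIM (what is proved, stated in full; the proofs are below) =====
def Claim_equal_mode : Prop := ∀ (l : List Int), Dom_mode l → Pre_mode l → Spec_mode l (mode l)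

-- ===== LEMMAS AND PROOFS =====

-- A's freq loop counts occurrences
theorem freq_aux (v : Int) (l : List Int) : ∀ c0 : Int,
    l.foldl (fun c i => if i == v then c + 1 else c) c0 = c0 + (l.count v : Int) := by
  induction l with
  | nil => simp
  | cons x t ih =>
    intro c0
    simp only [List.foldl_cons, List.count_cons, ih]
    by_cases h : x = v <;> simp [h, beq_iff_eq] <;> ring

theorem freq_eq_count (l : List Int) (v : Int) : freq l v = (l.count v : Int) := by
  have := freq_aux v l 0; simpa [freq] using this

-- elements whose count is already dominated by the running max are no-ops of the argmax fold
theorem drop_dominated (l : List Int) :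
    ∀ (xs : List Int) (s : Int × Int) (p : Int → Bool),
      (∀ x ∈ xs, p x = false → (l.count x : Int) ≤ s.2) →
      xs.foldl (fun s i => if (l.count i : Int) > s.2 then (i, (l.count i : Int)) else s) s
        = (xs.filter p).foldl (fun s i => if (l.count i : Int) > s.2 then (i, (l.count i : Int)) else s) s := by
  intro xs
  induction xs with
  | nil => intro s p _; rfl
  | cons x t ih =>
    intro s p h
    by_cases hp : p x = true
    · rw [List.filter_cons_of_pos hp]
      simp only [List.foldl_cons]
      apply ih
      intro y hy hpy
      refine le_trans (h y (List.mem_cons_of_mem _ hy) hpy) ?_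
      split <;> simp <;> omega
    · have hpx : p x = false := by simpa using hp
      rw [List.filter_cons_of_neg (by simp [hpx])]
      simp only [List.foldl_cons]
      have : ¬ ((l.count x : Int) > s.2) := by
        have := h x (List.mem_cons_self) hpx; omega
      rw [if_neg this]
      exact ih s p (fun y hy hpy => h y (List.mem_cons_of_mem _ hy) hpy)

-- first-occurrence dedup, unfolded one step
theorem dedup_cons (x : Int) (t : List Int) :
    PySem.List.dedup (x::t) = x :: (PySem.List.dedup t).filter (fun y => y ≠ x) := by
  simp only [PySem.List.dedup_eq_ofList]
  rw [show (x::t) = [x] ++ t by rfl, PySem.Set.ofList_append]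
  rw [PySem.Set.update_eq_append_filter]
  simp [PySem.Set.contains, PySem.Set.ofList]

-- folding the argmax step over a list or over its ordered dedup gives the same result
theorem fold_dedup (l : List Int) :
    ∀ (xs : List Int) (s : Int × Int),
      xs.foldl (fun s i => if (l.count i : Int) > s.2 then (i, (l.count i : Int)) else s) s
        = (PySem.List.dedup xs).foldl (fun s i => if (l.count i : Int) > s.2 then (i, (l.count i : Int)) else s) s := by
  intro xs
  induction xs with
  | nil => intro s; rfl
  | cons x t ih =>
    intro s
    rw [dedup_cons]
    simp only [List.foldl_cons]
    rw [ih]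
    apply drop_dominated
    intro y hy hpy
    have hyx : y = x := by simpa using hpy
    subst hyx
    split <;> simp <;> omega

-- ===== VERDICT (by name: the statement is the Claim_ definition above) =====
theorem mode_spec : Claim_equal_mode := by
  intro l _ hne
  unfold Spec_mode
  obtain ⟨x, t, rfl⟩ := List.exists_cons_of_ne_nil hne
  have hget : PySem.List.pyGet? (x::t) 0 = some x := by
    simp [PySem.List.pyGet?, PySem.List.pyIdx?]
  simp only [mode, mode_alt, hget]
  rw [PySem.Dict.foldl_insert_getD_add_one_eq_counter, PySem.Dict.items_counter]
  simp only [freq_eq_count, ← PySem.List.dedup_eq_ofList, List.foldl_map]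
  rw [← fold_dedup]
  simp only [List.foldl_cons]
  have hc : (0:Int) < ((x::t).count x : Int) := by
    have : 0 < (x::t).count x := List.count_pos_iff.mpr List.mem_cons_self
    exact_mod_cast this
  rw [if_neg (by omega), if_pos (by simpa using hc)]
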